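-- pv_equiv track=rewrite | github.com/ZhuoyuWei/tc3d | code/model.py | elements_2_nodes_mid
-- ===== SOURCE A (Python) =====
-- def elements_2_nodes_mid(elements,nodes,element_set=None):
--     node2count={}
--     for i,ele in enumerate(elements):
--         if element_set is None:
--             if int(ele['idx']) < 3:
--                 node2count[ele['node_id']] = 1
--             else:
--                 node2count[ele['node_id']] = 3
--         else:
--             count=node2count.get(ele['node_id'],0)
--             if ele['element_id'] in element_set:
--                 if int(ele['idx']) < 3:
--                     node2count[ele['node_id']] = 2
--                 else:
--                     node2count[ele['node_id']] = 4
--             elif count!=2 and count!=4: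
--                 if int(ele['idx']) < 3:
--                     node2count[ele['node_id']] = 1
--                 else:
--                     node2count[ele['node_id']] = 3
--
--     counts=[0]*len(nodes)
--     #for node in nodes:
--     for i,node in enumerate(nodes):
--         if node['node_id'] in node2count:
--             counts[i]=node2count.get(node['node_id'],0)
--
--     return counts
-- ===== SOURCE B (Python) =====
-- def elements_2_nodes_mid(elements, nodes, element_set=None):
--     # Group the elements by node_id (order preserved), then reduce each group once.
--     groups = {}
--     for ele in elements:
--         groups.setdefault(ele['node_id'], []).append(ele)
--
--     def code(group):
--         if element_set is not None:
--             for ele in reversed(group):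
--                 if ele['element_id'] in element_set:
--                     return 2 if int(ele['idx']) < 3 else 4
--         last = group[-1]
--         return 1 if int(last['idx']) < 3 else 3
--
--     return [code(groups[node['node_id']]) if node['node_id'] in groups else 0
--             for node in nodes]
-- ===== Notes on version B (the rewrite author's own statement) =====
-- stated objective: alternative
-- what changed: B replaces A's stateful 2/4-lock overwrite pass with a group-by-node_id dict of lists followed by a single backwards reduction per group (last matching element, else last element), then maps nodes over the resulting codes.
import Mathlib
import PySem

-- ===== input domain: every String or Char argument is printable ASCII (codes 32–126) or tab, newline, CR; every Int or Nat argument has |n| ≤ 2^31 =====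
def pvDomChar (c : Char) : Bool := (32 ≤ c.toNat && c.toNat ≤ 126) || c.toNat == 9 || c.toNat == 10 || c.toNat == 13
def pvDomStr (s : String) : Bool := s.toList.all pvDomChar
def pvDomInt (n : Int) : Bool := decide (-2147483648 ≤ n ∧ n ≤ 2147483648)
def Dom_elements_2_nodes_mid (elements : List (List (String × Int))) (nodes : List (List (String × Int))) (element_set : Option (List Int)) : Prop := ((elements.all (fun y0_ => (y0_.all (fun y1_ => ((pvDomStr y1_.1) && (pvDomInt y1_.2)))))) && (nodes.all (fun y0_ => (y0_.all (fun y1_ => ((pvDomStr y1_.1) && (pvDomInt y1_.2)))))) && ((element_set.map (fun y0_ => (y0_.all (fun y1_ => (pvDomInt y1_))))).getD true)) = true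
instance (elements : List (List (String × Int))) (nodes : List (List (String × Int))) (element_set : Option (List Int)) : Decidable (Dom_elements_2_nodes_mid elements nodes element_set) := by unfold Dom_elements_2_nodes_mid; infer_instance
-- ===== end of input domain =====

-- B replaces A's stateful 2/4-lock overwrite pass with group-by-node_id + one backwards reduction per group ("alternative": same cost, different decomposition).


-- d[k] for a Python dict given as an association list (duplicate keys: last value wins, as in dict(pairs)).
-- The 0 default is never reached on inputs satisfying Pre_ (there Python would raise KeyError).
def pvGetD (d : List (String × Int)) (k : String) : Int := (PySem.Dict.ofList d).getD k 0
-- 'k in d'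
def pvHasK (d : List (String × Int)) (k : String) : Bool := (PySem.Dict.ofList d).contains k

-- ===== PORT A =====
-- the body of A's first loop
def pvStepA (element_set : Option (List Int)) (d : PySem.Dict Int Int) (ele : List (String × Int)) : PySem.Dict Int Int :=
  match element_set with
  | none =>
    if pvGetD ele "idx" < 3 then d.insert (pvGetD ele "node_id") 1
    else d.insert (pvGetD ele "node_id") 3
  | some s =>
    let count := d.getD (pvGetD ele "node_id") 0
    if pvGetD ele "element_id" ∈ s then
      if pvGetD ele "idx" < 3 then d.insert (pvGetD ele "node_id") 2
      else d.insert (pvGetD ele "node_id") 4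
    else if count ≠ 2 ∧ count ≠ 4 then
      if pvGetD ele "idx" < 3 then d.insert (pvGetD ele "node_id") 1
      else d.insert (pvGetD ele "node_id") 3
    else d

def elements_2_nodes_mid (elements : List (List (String × Int))) (nodes : List (List (String × Int))) (element_set : Option (List Int)) : List Int :=
  let node2count := elements.foldl (pvStepA element_set) PySem.Dict.empty
  nodes.map (fun node =>
    if node2count.contains (pvGetD node "node_id") then node2count.getD (pvGetD node "node_id") 0 else 0)

-- ===== PORT B =====
-- Source B's code(group): last matching element (reversed scan), else group[-1]; [] never occurs (getLast? default 0 is unreachable in B's use).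
def pvGroupCode (group : List (List (String × Int))) (element_set : Option (List Int)) : Int :=
  let last : Int :=
    match group.getLast? with
    | some e => if pvGetD e "idx" < 3 then 1 else 3
    | none => 0
  match element_set with
  | some s =>
    match group.reverse.find? (fun e => decide (pvGetD e "element_id" ∈ s)) with
    | some e => if pvGetD e "idx" < 3 then 2 else 4
    | none => last
  | none => last

def elements_2_nodes_mid_alt (elements : List (List (String × Int))) (nodes : List (List (String × Int))) (element_set : Option (List Int)) : List Int :=
  let groups : PySem.Dict Int (List (List (String × Int))) :=
    elements.foldl (fun g ele => g.modify (pvGetD ele "node_id") [] (· ++ [ele])) PySem.Dict.empty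
  nodes.map (fun node =>
    match groups.get? (pvGetD node "node_id") with
    | some group => pvGroupCode group element_set
    | none => 0)

-- ===== PRECONDITION & SPEC =====
-- Pre_ excludes exactly the inputs on which A raises KeyError: some node lacks 'node_id', some element lacks
-- 'node_id' (or 'element_id' when element_set is given), or an element whose 'idx' A actually reads lacks 'idx'
-- (A reads ele['idx'] iff ele matches element_set or no earlier element of the same node matched).
def Pre_elements_2_nodes_mid (elements : List (List (String × Int))) (nodes : List (List (String × Int))) (element_set : Option (List Int)) : Prop :=
  (∀ n ∈ nodes, pvHasK n "node_id" = true) ∧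
  (∀ e ∈ elements, pvHasK e "node_id" = true) ∧
  (match element_set with
   | none => ∀ e ∈ elements, pvHasK e "idx" = true
   | some s =>
     (∀ e ∈ elements, pvHasK e "element_id" = true) ∧
     (∀ i, i < elements.length →
        (pvGetD (elements.getD i []) "element_id" ∈ s ∨
         ∀ j, j < i → ¬(pvGetD (elements.getD j []) "node_id" = pvGetD (elements.getD i []) "node_id" ∧
                        pvGetD (elements.getD j []) "element_id" ∈ s)) →
        pvHasK (elements.getD i []) "idx" = true))
instance (elements : List (List (String × Int))) (nodes : List (List (String × Int))) (element_set : Option (List Int)) : Decidable (Pre_elements_2_nodes_mid elements nodes element_set) := by unfold Pre_elements_2_nodes_mid; cases element_set <;> infer_instance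

def pvWitness_elements_2_nodes_mid : (List (List (String × Int))) × (List (List (String × Int))) × Option (List Int) :=
  ([[("node_id", 1), ("idx", 2), ("element_id", 5)], [("node_id", 2), ("idx", 4), ("element_id", 6)]],
   [[("node_id", 1)], [("node_id", 2)], [("node_id", 3)]],
   some [5])

def Spec_elements_2_nodes_mid (elements : List (List (String × Int))) (nodes : List (List (String × Int))) (element_set : Option (List Int)) (out : List Int) : Prop := out = elements_2_nodes_mid_alt elements nodes element_set
instance (elements : List (List (String × Int))) (nodes : List (List (String × Int))) (element_set : Option (List Int)) (out : List Int) : Decidable (Spec_elements_2_nodes_mid elements nodes element_set out) := by unfold Spec_elements_2_nodes_mid; infer_instance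

-- ===== CLAIM (what is proved, stated in full; the proofs are below) =====
def Claim_equal_elements_2_nodes_mid : Prop := ∀ (elements : List (List (String × Int))) (nodes : List (List (String × Int))) (element_set : Option (List Int)), Dom_elements_2_nodes_mid elements nodes element_set → Pre_elements_2_nodes_mid elements nodes element_set → Spec_elements_2_nodes_mid elements nodes element_set (elements_2_nodes_mid elements nodes element_set)

-- ===== LEMMAS AND PROOFS =====

lemma pv_foldA_none (xs : List (List (String × Int))) (d : PySem.Dict Int Int) (nid : Int) :
    (xs.foldl (pvStepA none) d).getD nid 0 =
      match xs.reverse.find? (fun e => pvGetD e "node_id" == nid) with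
      | some e => if pvGetD e "idx" < 3 then 1 else 3
      | none => d.getD nid 0 := by
  induction xs generalizing d with
  | nil => rfl
  | cons e rest ih =>
    rw [List.foldl_cons, ih, List.reverse_cons, List.find?_append]
    by_cases hk : pvGetD e "node_id" = nid
    · cases hm : rest.reverse.find? (fun e => pvGetD e "node_id" == nid) <;>
        simp [hm, pvStepA, hk, PySem.Dict.getD_insert] <;> split_ifs <;> simp
    · cases hm : rest.reverse.find? (fun e => pvGetD e "node_id" == nid) <;>
        simp [hm, pvStepA, hk, PySem.Dict.getD_insert] <;> split_ifs <;>
        simp [PySem.Dict.getD_insert, Ne.symm hk]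

lemma pv_stepA_some_getD (s : List Int) (d : PySem.Dict Int Int) (e : List (String × Int)) (nid : Int) :
    (pvStepA (some s) d e).getD nid 0 =
      if pvGetD e "node_id" = nid then
        (if pvGetD e "element_id" ∈ s then (if pvGetD e "idx" < 3 then 2 else 4)
         else if d.getD nid 0 = 2 ∨ d.getD nid 0 = 4 then d.getD nid 0
         else (if pvGetD e "idx" < 3 then 1 else 3))
      else d.getD nid 0 := by
  simp only [pvStepA]
  split_ifs with h1 h2 h3 h4 h5 h6 h7 <;>
    simp_all [PySem.Dict.getD_insert] <;> omega

lemma pv_foldA_some (s : List Int) (xs : List (List (String × Int))) (d : PySem.Dict Int Int) (nid : Int) :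
    (xs.foldl (pvStepA (some s)) d).getD nid 0 =
      match xs.reverse.find? (fun e => pvGetD e "node_id" == nid && decide (pvGetD e "element_id" ∈ s)) with
      | some e => if pvGetD e "idx" < 3 then 2 else 4
      | none =>
        match xs.reverse.find? (fun e => pvGetD e "node_id" == nid) with
        | some e =>
          if d.getD nid 0 = 2 ∨ d.getD nid 0 = 4 then d.getD nid 0
          else if pvGetD e "idx" < 3 then 1 else 3
        | none => d.getD nid 0 := by
  induction xs generalizing d with
  | nil => rfl
  | cons e rest ih =>
    rw [List.foldl_cons, ih, List.reverse_cons, List.find?_append, List.find?_append]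
    by_cases hk : pvGetD e "node_id" = nid
    · by_cases hs : pvGetD e "element_id" ∈ s <;>
        cases hm : rest.reverse.find? (fun e => pvGetD e "node_id" == nid && decide (pvGetD e "element_id" ∈ s)) <;>
        cases hn : rest.reverse.find? (fun e => pvGetD e "node_id" == nid) <;>
        simp [pv_stepA_some_getD, hk, hs] <;>
        split_ifs <;> simp_all <;> omega
    · cases hm : rest.reverse.find? (fun e => pvGetD e "node_id" == nid && decide (pvGetD e "element_id" ∈ s)) <;>
        cases hn : rest.reverse.find? (fun e => pvGetD e "node_id" == nid) <;>
        simp [pv_stepA_some_getD, hk, Ne.symm hk] <;>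
        split_ifs <;> simp_all <;> omega

lemma pv_groups_getD_aux (elements : List (List (String × Int))) (nid : Int)
    (g : PySem.Dict Int (List (List (String × Int)))) :
    (elements.foldl (fun g ele => g.modify (pvGetD ele "node_id") [] (· ++ [ele])) g).getD nid []
      = g.getD nid [] ++ elements.filter (fun e => pvGetD e "node_id" == nid) := by
  induction elements generalizing g with
  | nil => simp
  | cons e rest ih =>
    rw [List.foldl_cons, ih, List.filter_cons]
    by_cases hk : pvGetD e "node_id" = nid
    · simp [PySem.Dict.getD_modify, hk]
    · simp [PySem.Dict.getD_modify, hk, Ne.symm hk]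

lemma pv_groups_contains_aux (elements : List (List (String × Int))) (nid : Int)
    (g : PySem.Dict Int (List (List (String × Int)))) :
    (elements.foldl (fun g ele => g.modify (pvGetD ele "node_id") [] (· ++ [ele])) g).contains nid
      = (g.contains nid || !(elements.filter (fun e => pvGetD e "node_id" == nid)).isEmpty) := by
  induction elements generalizing g with
  | nil => simp
  | cons e rest ih =>
    rw [List.foldl_cons, ih, List.filter_cons]
    by_cases hk : pvGetD e "node_id" = nid
    · simp [PySem.Dict.contains_modify, hk]
    · have h2 : (nid == pvGetD e "node_id") = false := by simp [Ne.symm hk]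
      simp [PySem.Dict.contains_modify, hk, h2]

lemma pv_find?_filter (l : List (List (String × Int))) (p q : List (String × Int) → Bool) :
    (l.filter p).find? q = l.find? (fun x => p x && q x) := by
  induction l with
  | nil => rfl
  | cons e rest ih =>
    by_cases hp : p e = true <;> by_cases hq : q e = true <;>
      simp [List.filter_cons, List.find?_cons, hp, hq, ih]

lemma pv_if_contains (d : PySem.Dict Int Int) (nid : Int) :
    (if d.contains nid then d.getD nid 0 else 0) = d.getD nid 0 := by
  cases hc : d.contains nid with
  | true => simp
  | false => simp [PySem.Dict.getD_of_not_contains _ _ hc]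

lemma pv_node_value (elements : List (List (String × Int))) (element_set : Option (List Int)) (nid : Int) :
    (if (elements.foldl (pvStepA element_set) PySem.Dict.empty).contains nid
     then (elements.foldl (pvStepA element_set) PySem.Dict.empty).getD nid 0 else 0)
    = (match (elements.foldl (fun g ele => g.modify (pvGetD ele "node_id") [] (· ++ [ele])) PySem.Dict.empty).get? nid with
       | some group => pvGroupCode group element_set
       | none => 0) := by
  rw [pv_if_contains]
  cases hg : (elements.foldl (fun g ele => g.modify (pvGetD ele "node_id") [] (· ++ [ele])) PySem.Dict.empty).get? nid with
  | none =>
    have hc := pv_groups_contains_aux elements nid PySem.Dict.empty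
    rw [PySem.Dict.contains_eq_isSome_get?, hg] at hc
    simp at hc
    have hF : elements.filter (fun e => pvGetD e "node_id" == nid) = [] := by
      simpa [List.isEmpty_iff] using hc
    have hne : elements.reverse.find? (fun e => pvGetD e "node_id" == nid) = none := by
      rw [List.find?_eq_none]
      intro x hx
      have := List.filter_eq_nil_iff.mp hF x (List.mem_reverse.mp hx)
      simpa using this
    cases element_set with
    | none => simp [pv_foldA_none, hne]
    | some s =>
      have hnm : elements.reverse.find? (fun e => pvGetD e "node_id" == nid && decide (pvGetD e "element_id" ∈ s)) = none := by
        rw [List.find?_eq_none]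
        intro x hx
        have := List.filter_eq_nil_iff.mp hF x (List.mem_reverse.mp hx)
        simp_all
      simp [pv_foldA_some, hne, hnm]
  | some group =>
    have hc := pv_groups_contains_aux elements nid PySem.Dict.empty
    rw [PySem.Dict.contains_eq_isSome_get?, hg] at hc
    have hgrp : group = elements.filter (fun e => pvGetD e "node_id" == nid) := by
      have h1 := pv_groups_getD_aux elements nid PySem.Dict.empty
      rw [PySem.Dict.getD_eq_get?_getD, hg] at h1
      simpa using h1
    subst hgrp
    cases element_set with
    | none =>
      cases hn : elements.reverse.find? (fun e => pvGetD e "node_id" == nid) <;>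
        simp [pv_foldA_none, hn, pvGroupCode]
    | some s =>
      have hq : (List.filter (fun e => pvGetD e "node_id" == nid) elements).reverse.find?
            (fun e => decide (pvGetD e "element_id" ∈ s))
          = elements.reverse.find? (fun e => pvGetD e "node_id" == nid && decide (pvGetD e "element_id" ∈ s)) := by
        rw [← List.filter_reverse, pv_find?_filter]
      cases hm : elements.reverse.find? (fun e => pvGetD e "node_id" == nid && decide (pvGetD e "element_id" ∈ s)) <;>
      cases hn : elements.reverse.find? (fun e => pvGetD e "node_id" == nid) <;>
        simp [pv_foldA_some, hm, hn, pvGroupCode, hq]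

-- ===== VERDICT (by name: the statement is the Claim_ definition above) =====
theorem elements_2_nodes_mid_spec : Claim_equal_elements_2_nodes_mid := by
  intro elements nodes element_set _ _
  unfold Spec_elements_2_nodes_mid elements_2_nodes_mid elements_2_nodes_mid_alt
  refine List.map_congr_left (fun node _ => ?_)
  exact pv_node_value elements element_set (pvGetD node "node_id")
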